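-- pv_equiv track=rewrite | github.com/TimothySjiang/leetcodepy | goodTuples.py | goodTuples
-- ===== SOURCE A (Python) =====
-- import collections
--
-- def goodTuples(arr):
--     if len(arr) < 3:
--         return 0
--     count = 0
--     window = collections.Counter(arr[:3])
--     if len(window) == 2:
--         count += 1
--     for i in range(1,len(arr)-2):
--         window[arr[i-1]] -= 1
--         if not window[arr[i-1]]:
--             del window[arr[i-1]]
--         window[arr[i+2]] += 1
--         if len(window) == 2:
--             count += 1
--
--     return count
-- ===== SOURCE B (Python) =====
-- def good_window(arr, i):
--     return 1 if len(set(arr[i:i+3])) == 2 else 0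
--
-- def goodTuples(arr):
--     return sum(good_window(arr, i) for i in range(len(arr) - 2))
-- ===== Notes on version B (the rewrite author's own statement) =====
-- stated objective: simpler
-- what changed: Replaces the incrementally maintained Counter (with delete-on-zero bookkeeping and a special-cased first window) by one uniform pass that recomputes each 3-window's distinct count freshly via len(set(arr[i:i+3])); no state is carried between iterations.
import Mathlib
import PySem

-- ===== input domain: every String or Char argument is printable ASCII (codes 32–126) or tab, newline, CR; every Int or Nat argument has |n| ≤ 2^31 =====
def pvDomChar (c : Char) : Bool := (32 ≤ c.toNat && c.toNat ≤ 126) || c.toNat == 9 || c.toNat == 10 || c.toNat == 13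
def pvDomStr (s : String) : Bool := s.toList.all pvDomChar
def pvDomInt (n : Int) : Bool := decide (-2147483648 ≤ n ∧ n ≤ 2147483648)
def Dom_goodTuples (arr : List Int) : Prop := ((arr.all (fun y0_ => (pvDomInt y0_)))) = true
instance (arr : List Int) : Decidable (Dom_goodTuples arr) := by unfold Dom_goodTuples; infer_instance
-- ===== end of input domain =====

-- B replaces A's incrementally maintained Counter by a uniform pass recomputing each window's distinct count freshly (objective: simpler).

-- ===== PORT A =====
-- the body of A's for-loop, state = (count, window)
def gtStep (arr : List Int) (s : Int × PySem.Dict Int Int) (i : Int) : Int × PySem.Dict Int Int :=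
  let count := s.1
  let window := s.2
  let x := PySem.List.pyGetD arr (i - 1) 0
  let window := window.insert x (window.getD x 0 - 1)          -- window[arr[i-1]] -= 1
  let window := if window.getD x 0 == 0 then window.erase x else window  -- if not …: del …
  let y := PySem.List.pyGetD arr (i + 2) 0
  let window := window.insert y (window.getD y 0 + 1)          -- window[arr[i+2]] += 1
  (if window.size = 2 then count + 1 else count, window)

def goodTuples (arr : List Int) : Int :=
  if (arr.length : Int) < 3 then 0
  else
    let window := PySem.Dict.counter (PySem.List.slice arr none (some 3))
    let count : Int := if window.size = 2 then 1 else 0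
    ((PySem.List.pyRange 1 ((arr.length : Int) - 2) 1).foldl (gtStep arr) (count, window)).1

-- ===== PORT B =====
def goodWindow (arr : List Int) (i : Int) : Int :=
  if (PySem.Set.ofList (PySem.List.slice arr (some i) (some (i + 3)))).length = 2 then 1 else 0

def goodTuples_alt (arr : List Int) : Int :=
  ((PySem.List.pyRange 0 ((arr.length : Int) - 2) 1).map (goodWindow arr)).sum

-- ===== PRECONDITION & SPEC =====
def Spec_goodTuples (arr : List Int) (out : Int) : Prop := out = goodTuples_alt arr
instance (arr : List Int) (out : Int) : Decidable (Spec_goodTuples arr out) := by unfold Spec_goodTuples; infer_instance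

-- ===== CLAIM (what is proved, stated in full; the proofs are below) =====
def Claim_equal_goodTuples : Prop := ∀ (arr : List Int), Dom_goodTuples arr → Spec_goodTuples arr (goodTuples arr)

-- ===== LEMMAS AND PROOFS =====

-- the 3-element window of arr starting at position k
def wdw (arr : List Int) (k : Nat) : List Int := (arr.drop k).take 3

-- invariant relating A's running dict to the current window
def GTInv (W : PySem.Dict Int Int) (L : List Int) : Prop :=
  W.keys.Nodup ∧ ∀ k : Int, W.get? k = if L.count k = 0 then none else some ((L.count k : Int))

lemma dict_get?_erase (d : PySem.Dict Int Int) (k k' : Int) :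
    (d.erase k).get? k' = if k' = k then none else d.get? k' := by
  obtain ⟨items⟩ := d
  induction items with
  | nil => simp [PySem.Dict.erase, PySem.Dict.get?]
  | cons p t ih =>
      simp only [PySem.Dict.erase, PySem.Dict.get?, List.filter_cons] at ih ⊢
      by_cases h1 : p.1 = k <;> by_cases h2 : p.1 = k' <;> simp_all

lemma dict_nodup_keys_erase (d : PySem.Dict Int Int) (k : Int) (h : d.keys.Nodup) :
    (d.erase k).keys.Nodup := by
  have hsub : (d.erase k).keys.Sublist d.keys :=
    List.Sublist.map _ List.filter_sublist
  exact h.sublist hsub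

lemma gtInv_size (W : PySem.Dict Int Int) (L : List Int) (h : GTInv W L) :
    W.size = (PySem.Set.ofList L).length := by
  obtain ⟨hnd, hg⟩ := h
  have hperm : W.keys.Perm (PySem.Set.ofList L) := by
    rw [List.perm_ext_iff_of_nodup hnd (PySem.Set.nodup_ofList L)]
    intro a
    rw [PySem.Set.mem_ofList]
    constructor
    · intro ha
      have := hg a
      rw [if_neg] at this
      · exact List.count_pos_iff.mp (Nat.pos_of_ne_zero (by
          intro h0
          have := hg a
          rw [h0] at this
          simp at this
          exact (PySem.Dict.get?_eq_none_iff_not_mem_keys W a).mp this ha))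
      · intro h0
        have := hg a
        rw [h0] at this; simp at this
        exact (PySem.Dict.get?_eq_none_iff_not_mem_keys W a).mp this ha
    · intro ha
      by_contra hna
      have hnone := (PySem.Dict.get?_eq_none_iff_not_mem_keys W a).mpr hna
      have := hg a
      rw [hnone] at this
      split at this
      · next h0 => exact (List.count_pos_iff.mpr ha).ne' (by omega)
      · simp at this
  have : W.keys.length = (PySem.Set.ofList L).length := hperm.length_eq
  simpa [PySem.Dict.size, PySem.Dict.keys, List.length_map] using this

-- appending y to the window is one overwriting insert
lemma gtPush (V : PySem.Dict Int Int) (y : Int) (M : List Int) (h : GTInv V M) :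
    GTInv (V.insert y (V.getD y 0 + 1)) (M ++ [y]) := by
  obtain ⟨hnd, hg⟩ := h
  have hD : V.getD y 0 = (M.count y : Int) := by
    rw [PySem.Dict.getD_eq_get?_getD, hg y]
    split_ifs with h0
    · simp [h0]
    · rfl
  refine ⟨PySem.Dict.nodup_keys_insert _ _ _ hnd, fun k => ?_⟩
  rw [PySem.Dict.get?_insert]
  by_cases hk : k = y
  · subst hk
    have hc : (M ++ [k]).count k = M.count k + 1 := by simp [List.count_append]
    rw [if_pos rfl, if_neg (by omega), hc, hD]
    push_cast
    ring_nf
  · have hc : (M ++ [y]).count k = M.count k := by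
      simp [List.count_append, Ne.symm hk]
    rw [if_neg hk, hg k, hc]

-- one in-place update of A's dict moves the window one step right
lemma gtUpdate (W : PySem.Dict Int Int) (a y : Int) (M : List Int) (h : GTInv W (a :: M)) :
    GTInv (let W1 := W.insert a (W.getD a 0 - 1);
           let W2 := if W1.getD a 0 == 0 then W1.erase a else W1;
           W2.insert y (W2.getD y 0 + 1)) (M ++ [y]) := by
  obtain ⟨hnd, hg⟩ := h
  have hga : W.get? a = some ((M.count a : Int) + 1) := by
    have := hg a
    rw [if_neg (by simp [List.count_cons_self])] at this
    rw [this]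
    congr 1
    push_cast [List.count_cons_self]
    ring
  have hgetD : W.getD a 0 = (M.count a : Int) + 1 := by
    simp [PySem.Dict.getD_eq_get?_getD, hga]
  -- the intermediate dict W2 satisfies the invariant for M
  have hmid : GTInv (if (W.insert a (W.getD a 0 - 1)).getD a 0 == 0
                     then (W.insert a (W.getD a 0 - 1)).erase a
                     else W.insert a (W.getD a 0 - 1)) M := by
    have h1get : ∀ k : Int, (W.insert a (W.getD a 0 - 1)).get? k =
        if k = a then some ((M.count a : Int)) else W.get? k := by
      intro k
      rw [PySem.Dict.get?_insert]
      split_ifs with hk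
      · rw [hgetD]; ring_nf
      · rfl
    have h1a : (W.insert a (W.getD a 0 - 1)).getD a 0 = (M.count a : Int) := by
      simp [PySem.Dict.getD_eq_get?_getD, hga]
    have h1nd : (W.insert a (W.getD a 0 - 1)).keys.Nodup := PySem.Dict.nodup_keys_insert _ _ _ hnd
    split_ifs with hz
    · -- erased: M.count a = 0
      have hz0 : M.count a = 0 := by
        rw [h1a] at hz
        exact_mod_cast beq_iff_eq.mp hz
      refine ⟨dict_nodup_keys_erase _ _ h1nd, fun k => ?_⟩
      rw [dict_get?_erase]
      by_cases hk : k = a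
      · subst hk; rw [if_pos rfl, if_pos hz0]
      · rw [if_neg hk, h1get k, if_neg hk, hg k]
        have : (a :: M).count k = M.count k := by
          rw [List.count_cons]; simp [Ne.symm hk]
        rw [this]
    · -- kept: M.count a ≠ 0
      have hz0 : M.count a ≠ 0 := by
        intro h0
        apply hz
        rw [h1a, h0]
        simp
      refine ⟨h1nd, fun k => ?_⟩
      rw [h1get k]
      by_cases hk : k = a
      · subst hk
        rw [if_pos rfl, if_neg hz0]
      · rw [if_neg hk, hg k]
        have : (a :: M).count k = M.count k := by
          rw [List.count_cons]; simp [Ne.symm hk]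
        rw [this]
  exact gtPush _ y M hmid

lemma wdw_head (arr : List Int) (k : Nat) (hk : k + 3 ≤ arr.length) :
    wdw arr k = arr[k]'(by omega) :: (arr.drop (k + 1)).take 2 := by
  unfold wdw
  rw [List.drop_eq_getElem_cons (by omega)]
  rfl

lemma wdw_last (arr : List Int) (k : Nat) (hk : k + 4 ≤ arr.length) :
    wdw arr (k + 1) = (arr.drop (k + 1)).take 2 ++ [arr[k + 3]'(by omega)] := by
  unfold wdw
  have hlen : 2 < (arr.drop (k + 1)).length := by
    rw [List.length_drop]; omega
  have h3 : List.take 3 (arr.drop (k + 1))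
      = List.take 2 (arr.drop (k + 1)) ++ (arr.drop (k + 1))[2]?.toList :=
    List.take_add_one
  rw [h3, List.getElem?_eq_getElem hlen]
  simp [List.getElem_drop]

lemma slice_wdw (arr : List Int) (j : Int) (hj : 0 ≤ j) :
    PySem.List.slice arr (some j) (some (j + 3)) = wdw arr j.toNat := by
  rw [PySem.List.slice_toNat arr hj (by omega)]
  unfold wdw
  congr 1
  omega

-- one iteration of A's loop: invariant advances and the counter gains goodWindow
lemma gtStep_eq (arr : List Int) (c : Int) (W : PySem.Dict Int Int) (k : Nat)
    (hk : k + 4 ≤ arr.length) (h : GTInv W (wdw arr k)) :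
    GTInv (gtStep arr (c, W) ((k : Int) + 1)).2 (wdw arr (k + 1)) ∧
    (gtStep arr (c, W) ((k : Int) + 1)).1 = c + goodWindow arr ((k : Int) + 1) := by
  have hk1 : k < arr.length := by omega
  have hk3 : k + 3 < arr.length := by omega
  have hgx : arr[k]? = some (arr[k]'hk1) := List.getElem?_eq_getElem hk1
  have hgy : arr[k + 3]? = some (arr[k + 3]'hk3) := List.getElem?_eq_getElem hk3
  have hpx : PySem.List.pyGetD arr ((k : Int) + 1 - 1) 0 = arr[k]'hk1 := by
    rw [PySem.List.pyGetD_eq_getElem arr 0 (by omega) (by omega)]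
    congr 1
    omega
  have hpy : PySem.List.pyGetD arr ((k : Int) + 1 + 2) 0 = arr[k + 3]'hk3 := by
    rw [PySem.List.pyGetD_eq_getElem arr 0 (by omega) (by omega)]
    congr 1
  have hW : GTInv (gtStep arr (c, W) ((k : Int) + 1)).2 (wdw arr (k + 1)) := by
    rw [wdw_last arr k hk]
    have h' := h
    rw [wdw_head arr k (by omega)] at h'
    have h2 := gtUpdate W (arr[k]'hk1) (arr[k + 3]'hk3) ((arr.drop (k + 1)).take 2) h'
    simp only [gtStep, hpx, hpy]
    exact h2
  refine ⟨hW, ?_⟩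
  have hsize := gtInv_size _ _ hW
  have hslice : PySem.List.slice arr (some ((k : Int) + 1)) (some ((k : Int) + 1 + 3)) = wdw arr (k + 1) := by
    rw [slice_wdw arr ((k : Int) + 1) (by omega)]
    congr 1
  simp only [gtStep, goodWindow, hpx, hpy, hslice]
  simp only [gtStep, hpx, hpy] at hsize
  split_ifs with h1 h2 h2 <;> simp_all

-- A's loop from position k+1 adds exactly B's per-window counts
lemma gtLoop (arr : List Int) : ∀ (m k : Nat) (c : Int) (W : PySem.Dict Int Int),
    k + 3 ≤ arr.length → ((arr.length : Int) - 2 - ((k : Int) + 1)).toNat = m →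
    GTInv W (wdw arr k) →
    ((PySem.List.pyRange ((k : Int) + 1) ((arr.length : Int) - 2) 1).foldl (gtStep arr) (c, W)).1
      = c + ((PySem.List.pyRange ((k : Int) + 1) ((arr.length : Int) - 2) 1).map (goodWindow arr)).sum := by
  intro m
  induction m with
  | zero =>
      intro k c W hk hm _
      rw [PySem.List.pyRange_one_eq_nil (by omega)]
      simp
  | succ m ih =>
      intro k c W hk hm hW
      have hlt : (k : Int) + 1 < (arr.length : Int) - 2 := by omega
      rw [PySem.List.pyRange_one_cons hlt]
      obtain ⟨hW', hc'⟩ := gtStep_eq arr c W k (by omega) hW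
      simp only [List.foldl_cons, List.map_cons, List.sum_cons]
      have hstep : gtStep arr (c, W) ((k : Int) + 1)
          = ((gtStep arr (c, W) ((k : Int) + 1)).1, (gtStep arr (c, W) ((k : Int) + 1)).2) := rfl
      rw [hstep, hc']
      have hcast : (k : Int) + 1 + 1 = ((k + 1 : Nat) : Int) + 1 := by push_cast; ring
      rw [hcast]
      rw [ih (k + 1) (c + goodWindow arr ((k : Int) + 1)) _ (by omega) (by push_cast; omega) hW']
      push_cast
      ring

lemma gtInv_counter (L : List Int) : GTInv (PySem.Dict.counter L) L := by
  refine ⟨PySem.Dict.nodup_keys_counter L, fun k => ?_⟩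
  by_cases hc : (PySem.Dict.counter L).contains k
  · have hk : k ∈ L := by
      rw [PySem.Dict.contains_counter] at hc
      exact List.contains_iff_mem.mp hc
    have hcount : L.count k ≠ 0 := (List.count_pos_iff.mpr hk).ne'
    rw [if_neg hcount]
    have hD := PySem.Dict.getD_counter L k
    rw [PySem.Dict.getD_eq_get?_getD] at hD
    cases hg : (PySem.Dict.counter L).get? k with
    | none =>
        exfalso
        rw [PySem.Dict.contains_eq_isSome_get?, hg] at hc
        simp at hc
    | some v =>
        rw [hg] at hD
        simp at hD
        rw [hD]
  · have hk : k ∉ L := by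
      rw [PySem.Dict.contains_counter] at hc
      simpa using hc
    have hcount : L.count k = 0 := List.count_eq_zero.mpr hk
    rw [if_pos hcount]
    rw [PySem.Dict.contains_eq_isSome_get?] at hc
    cases hg : (PySem.Dict.counter L).get? k with
    | none => rfl
    | some v => rw [hg] at hc; simp at hc

-- ===== VERDICT (by name: the statement is the Claim_ definition above) =====
theorem goodTuples_spec : Claim_equal_goodTuples := by
  unfold Claim_equal_goodTuples
  intro arr _
  unfold Spec_goodTuples goodTuples goodTuples_alt
  by_cases hn : (arr.length : Int) < 3
  · rw [if_pos hn, PySem.List.pyRange_one_eq_nil (by omega)]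
    simp
  · rw [if_neg hn]
    have h3 : 3 ≤ arr.length := by omega
    have hL0 : PySem.List.slice arr none (some 3) = wdw arr 0 := by
      rw [PySem.List.slice_to arr (by omega)]
      unfold wdw
      simp
    have hInv0 : GTInv (PySem.Dict.counter (PySem.List.slice arr none (some 3))) (wdw arr 0) := by
      rw [hL0]; exact gtInv_counter _
    have hsize0 := gtInv_size _ _ hInv0
    have hB0 : PySem.List.pyRange 0 ((arr.length : Int) - 2) 1
        = 0 :: PySem.List.pyRange 1 ((arr.length : Int) - 2) 1 :=
      PySem.List.pyRange_one_cons (by omega)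
    have hgw0 : goodWindow arr 0 = if (PySem.Set.ofList (wdw arr 0)).length = 2 then 1 else 0 := by
      unfold goodWindow
      rw [show (0 : Int) + 3 = 3 by ring, show PySem.List.slice arr (some 0) (some 3) = PySem.List.slice arr none (some 3) from PySem.List.slice_zero_start arr (some 3), hL0]
    have hloop := gtLoop arr ((arr.length : Int) - 2 - 1).toNat 0
      (if (PySem.Dict.counter (PySem.List.slice arr none (some 3))).size = 2 then 1 else 0)
      (PySem.Dict.counter (PySem.List.slice arr none (some 3)))
      (by omega) (by push_cast; omega) (by rw [hL0]; exact gtInv_counter _)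
    simp only [Nat.cast_zero, zero_add] at hloop
    rw [hloop, hB0]
    simp only [List.map_cons, List.sum_cons]
    rw [hgw0, hsize0]
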